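-- pv_equiv track=rewrite | github.com/dsychoi/aoc2023 | day11/day11.py | bfs
-- ===== SOURCE A (Python) =====
-- from collections import deque
--
-- def bfs(universe, start):
--     queue = deque([start])
--     distances = {start: 0}
--     while queue:
--         x, y = queue.popleft()
--         for dx, dy in [(-1, 0), (1, 0), (0, -1), (0, 1)]:
--             nx, ny = x + dx, y + dy
--             if 0 <= nx < len(universe) and 0 <= ny < len(universe[0]) and (nx, ny) not in distances:
--                 distances[nx, ny] = distances[x, y] + 1
--                 queue.append((nx, ny))
--     return distances
-- ===== SOURCE B (Python) =====
-- def bfs(universe, start):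
--     R = len(universe)
--     C = len(universe[0]) if universe else 0
--     items = [(start, 0)]
--     seen = {start}
--     frontier = [start]
--     d = 0
--     while frontier:
--         d += 1
--         nxt = []
--         for x, y in frontier:
--             for cell in ((x - 1, y), (x + 1, y), (x, y - 1), (x, y + 1)):
--                 if 0 <= cell[0] < R and 0 <= cell[1] < C and cell not in seen:
--                     seen.add(cell)
--                     items.append((cell, d))
--                     nxt.append(cell)
--         frontier = nxt
--     return dict(items)
-- ===== Notes on version B (the rewrite author's own statement) =====
-- stated objective: alternative
-- what changed: Replaces the deque-plus-distance-dict BFS (per-cell queue pops with distances[x,y]+1 lookups) by level-synchronous frontier expansion: a seen-set, an items list and a level counter d, where each whole frontier is expanded into the next one and every discovered cell is tagged d with no per-cell dict lookup.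
import Mathlib
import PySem

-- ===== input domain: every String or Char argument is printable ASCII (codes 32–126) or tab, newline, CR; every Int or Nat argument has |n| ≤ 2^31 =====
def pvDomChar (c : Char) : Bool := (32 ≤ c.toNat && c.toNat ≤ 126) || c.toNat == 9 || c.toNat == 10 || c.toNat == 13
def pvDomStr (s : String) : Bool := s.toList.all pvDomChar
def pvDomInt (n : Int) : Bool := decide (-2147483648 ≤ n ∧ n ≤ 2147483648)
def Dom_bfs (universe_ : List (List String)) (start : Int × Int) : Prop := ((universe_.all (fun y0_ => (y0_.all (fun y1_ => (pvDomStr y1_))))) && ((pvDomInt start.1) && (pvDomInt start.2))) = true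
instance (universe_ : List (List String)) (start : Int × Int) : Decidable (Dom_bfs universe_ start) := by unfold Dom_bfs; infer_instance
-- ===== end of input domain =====

-- B replaces the deque-and-distance-dict BFS by level-synchronous frontier expansion with a seen-set
-- and a level counter (objective: alternative; same O(R*C) cost; return value only — neither version mutates its arguments).

-- ===== PORT A =====
-- A's direction list [(-1,0),(1,0),(0,-1),(0,1)]
def bfsDirs : List (Int × Int) := [(-1, 0), (1, 0), (0, -1), (0, 1)]

-- body of A's inner `for dx, dy in …` loop: one neighbour candidate, state = (queue-after-popped-head, distances)
def bfsStep (R C : Int) (xy : Int × Int)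
    (s : List (Int × Int) × PySem.Dict (Int × Int) Int) (dxy : Int × Int) :
    List (Int × Int) × PySem.Dict (Int × Int) Int :=
  let n : Int × Int := (xy.1 + dxy.1, xy.2 + dxy.2)
  if 0 ≤ n.1 ∧ n.1 < R ∧ 0 ≤ n.2 ∧ n.2 < C ∧ s.2.get? n = none then
    (s.1 ++ [n], s.2.insert n (s.2.getD xy 0 + 1))
  else s

-- A's `while queue:` loop; fuel only makes the recursion total, it is never exhausted
-- (each iteration pops one cell and every enqueued cell is a fresh key of the grid, so
--  #iterations ≤ 1 + R*C ≤ the fuel supplied below).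
def bfsLoop (R C : Int) : Nat → List (Int × Int) → PySem.Dict (Int × Int) Int → PySem.Dict (Int × Int) Int
  | _, [], dist => dist
  | 0, _ :: _, dist => dist
  | f + 1, xy :: qs, dist =>
      let s := bfsDirs.foldl (bfsStep R C xy) (qs, dist)
      bfsLoop R C f s.1 s.2

-- Python's `len(universe[0])` is only evaluated when `0 <= nx < len(universe)` holds, i.e. when
-- the list is non-empty; `headD []` is exact there and its value is irrelevant otherwise.
def bfs (universe_ : List (List String)) (start : Int × Int) : List (Int × Int × Int) :=
  let R : Int := universe_.length
  let C : Int := (universe_.headD []).length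
  let dist := bfsLoop R C (universe_.length * (universe_.headD []).length + 1)
      [start] (PySem.Dict.ofList [(start, 0)])
  dist.items.map (fun p => (p.1.1, p.1.2, p.2))

-- ===== PORT B =====
-- the four orthogonal neighbour cells of B's inner tuple
def bfsAltNbrs (xy : Int × Int) : List (Int × Int) :=
  [(xy.1 - 1, xy.2), (xy.1 + 1, xy.2), (xy.1, xy.2 - 1), (xy.1, xy.2 + 1)]

-- body of B's `for cell in …` loop, state = (items, seen, nxt)
def bfsAltStep (R C : Int) (d : Int)
    (s : List ((Int × Int) × Int) × PySem.Set (Int × Int) × List (Int × Int)) (c : Int × Int) :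
    List ((Int × Int) × Int) × PySem.Set (Int × Int) × List (Int × Int) :=
  if 0 ≤ c.1 ∧ c.1 < R ∧ 0 ≤ c.2 ∧ c.2 < C ∧ ¬ (PySem.Set.contains s.2.1 c = true) then
    (s.1 ++ [(c, d)], PySem.Set.add s.2.1 c, s.2.2 ++ [c])
  else s

-- B's `for x, y in frontier:` loop body
def bfsAltCell (R C : Int) (d : Int)
    (s : List ((Int × Int) × Int) × PySem.Set (Int × Int) × List (Int × Int)) (xy : Int × Int) :
    List ((Int × Int) × Int) × PySem.Set (Int × Int) × List (Int × Int) :=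
  (bfsAltNbrs xy).foldl (bfsAltStep R C d) s

-- B's `while frontier:` loop; as for A the fuel is never exhausted (every level past the first
-- marks at least one fresh grid cell seen, so #levels ≤ 1 + R*C).
def bfsAltLoop (R C : Int) :
    Nat → List ((Int × Int) × Int) → PySem.Set (Int × Int) → List (Int × Int) → Int →
    List ((Int × Int) × Int)
  | _, items, _, [], _ => items
  | 0, items, _, _ :: _, _ => items
  | f + 1, items, seen, frontier, d =>
      let st := frontier.foldl (bfsAltCell R C (d + 1)) (items, seen, [])
      bfsAltLoop R C f st.1 st.2.1 st.2.2 (d + 1)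

def bfs_alt (universe_ : List (List String)) (start : Int × Int) : List (Int × Int × Int) :=
  let R : Int := universe_.length
  let C : Int := (universe_.headD []).length
  let items := bfsAltLoop R C (universe_.length * (universe_.headD []).length + 1)
      [(start, 0)] (PySem.Set.ofList [start]) [start] 0
  items.map (fun p => (p.1.1, p.1.2, p.2))

-- ===== PRECONDITION & SPEC =====
def Spec_bfs (universe_ : List (List String)) (start : Int × Int) (out : List (Int × Int × Int)) : Prop := out = bfs_alt universe_ start
instance (universe_ : List (List String)) (start : Int × Int) (out : List (Int × Int × Int)) : Decidable (Spec_bfs universe_ start out) := by unfold Spec_bfs; infer_instance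

-- ===== CLAIM (what is proved, stated in full; the proofs are below) =====
def Claim_equal_bfs : Prop := ∀ (universe_ : List (List String)) (start : Int × Int), Dom_bfs universe_ start → Spec_bfs universe_ start (bfs universe_ start)

-- ===== LEMMAS AND PROOFS =====

-- the grid cells, enumerated once; used only to measure fuel consumption
def pvCells (R C : Int) : List (Int × Int) :=
  (List.range R.toNat ×ˢ List.range C.toNat).map (fun p => ((p.1 : Int), (p.2 : Int)))

def pvMissing (R C : Int) (dist : PySem.Dict (Int × Int) Int) : Nat :=
  (pvCells R C).countP (fun c => (dist.get? c).isNone)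

theorem pvCells_mem (R C : Int) (c : Int × Int) :
    c ∈ pvCells R C ↔ (0 ≤ c.1 ∧ c.1 < R ∧ 0 ≤ c.2 ∧ c.2 < C) := by
  obtain ⟨a, b⟩ := c
  simp only [pvCells, List.mem_map, List.mem_product, List.mem_range, Prod.mk.injEq, Prod.exists]
  constructor
  · rintro ⟨i, j, ⟨hi, hj⟩, rfl, rfl⟩
    omega
  · rintro ⟨h1, h2, h3, h4⟩
    exact ⟨a.toNat, b.toNat, ⟨by omega, by omega⟩, by omega, by omega⟩

theorem pvCells_nodup (R C : Int) : (pvCells R C).Nodup := by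
  refine ((List.nodup_range).product (List.nodup_range)).map ?_
  intro p q h
  obtain ⟨h1, h2⟩ := Prod.mk.injEq .. ▸ h
  exact Prod.ext (by exact_mod_cast h1) (by exact_mod_cast h2)

theorem pvCells_length (R C : Int) : (pvCells R C).length = R.toNat * C.toNat := by
  simp [pvCells, List.length_product]

theorem pvMissing_le (R C : Int) (dist : PySem.Dict (Int × Int) Int) :
    pvMissing R C dist ≤ R.toNat * C.toNat := by
  calc pvMissing R C dist ≤ (pvCells R C).length := List.countP_le_length
    _ = R.toNat * C.toNat := pvCells_length R C

theorem pvCountP_insert (dist : PySem.Dict (Int × Int) Int) (c : Int × Int) (v : Int)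
    (h : dist.get? c = none) :
    ∀ l : List (Int × Int), l.Nodup → c ∈ l →
    l.countP (fun x => ((dist.insert c v).get? x).isNone) + 1
      = l.countP (fun x => (dist.get? x).isNone) := by
  intro l
  induction l with
  | nil => intro _ hc; cases hc
  | cons a t ih =>
    intro hnd hc
    rcases List.nodup_cons.mp hnd with ⟨ha, hnd'⟩
    by_cases hac : a = c
    · subst hac
      have h1 : ((dist.insert a v).get? a).isNone = false := by
        rw [PySem.Dict.get?_insert_self]; rfl
      have h2 : (dist.get? a).isNone = true := by rw [h]; rfl
      rw [List.countP_cons, List.countP_cons, h1, h2]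
      have heq : t.countP (fun x => ((dist.insert a v).get? x).isNone)
          = t.countP (fun x => (dist.get? x).isNone) := by
        apply List.countP_congr
        intro x hx
        have hxa : x ≠ a := fun hh => ha (hh ▸ hx)
        simp [PySem.Dict.get?_insert, hxa]
      simp [heq]
    · have hct : c ∈ t := by
        rcases List.mem_cons.mp hc with h' | h'
        · exact absurd h'.symm hac
        · exact h'
      have hheads : ((dist.insert c v).get? a).isNone = (dist.get? a).isNone := by
        simp [PySem.Dict.get?_insert, hac]
      rw [List.countP_cons, List.countP_cons, hheads]
      have := ih hnd' hct
      omega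

theorem pvMissing_insert (R C : Int) (dist : PySem.Dict (Int × Int) Int) (c : Int × Int) (v : Int)
    (hin : 0 ≤ c.1 ∧ c.1 < R ∧ 0 ≤ c.2 ∧ c.2 < C) (h : dist.get? c = none) :
    pvMissing R C (dist.insert c v) + 1 = pvMissing R C dist :=
  pvCountP_insert dist c v h (pvCells R C) (pvCells_nodup R C) ((pvCells_mem R C c).mpr hin)

theorem pvSet_contains_add {α : Type} [BEq α] [LawfulBEq α] (s : PySem.Set α) (x y : α) :
    PySem.Set.contains (PySem.Set.add s x) y = (y == x || PySem.Set.contains s y) := by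
  unfold PySem.Set.add PySem.Set.contains
  by_cases hx : List.contains s x = true
  · rw [if_pos hx]
    by_cases hyx : (y == x) = true
    · have : y = x := eq_of_beq hyx
      subst this
      simp [List.contains_iff_mem.mp hx]
    · simp [hyx]
  · rw [if_neg hx, List.contains_append]
    simp [Bool.or_comm]

theorem pvNbrs_eq (xy : Int × Int) :
    bfsAltNbrs xy = bfsDirs.map (fun v => (xy.1 + v.1, xy.2 + v.2)) := by
  simp only [bfsAltNbrs, bfsDirs, List.map_cons, List.map_nil, List.cons.injEq, Prod.mk.injEq,
    and_true]
  norm_num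
  exact ⟨by ring, by ring⟩

-- one popped cell of A against one frontier cell of B, folding over the same direction list
theorem pvSimDirs (R C : Int) (xy : Int × Int) (d : Int) (rest : List (Int × Int)) :
    ∀ (dirs nxt : List (Int × Int)) (items : List ((Int × Int) × Int))
      (seen : PySem.Set (Int × Int)) (dist : PySem.Dict (Int × Int) Int),
    dist.items = items →
    (∀ c, PySem.Set.contains seen c = (dist.get? c).isSome) →
    dist.get? xy = some d →
    (∀ c ∈ nxt, dist.get? c = some (d + 1)) →
    (dirs.foldl (bfsStep R C xy) (rest ++ nxt, dist)).1
        = rest ++ ((dirs.map (fun v => (xy.1 + v.1, xy.2 + v.2))).foldl (bfsAltStep R C (d + 1)) (items, seen, nxt)).2.2 ∧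
    (dirs.foldl (bfsStep R C xy) (rest ++ nxt, dist)).2.items
        = ((dirs.map (fun v => (xy.1 + v.1, xy.2 + v.2))).foldl (bfsAltStep R C (d + 1)) (items, seen, nxt)).1 ∧
    (∀ c, PySem.Set.contains ((dirs.map (fun v => (xy.1 + v.1, xy.2 + v.2))).foldl (bfsAltStep R C (d + 1)) (items, seen, nxt)).2.1 c
        = ((dirs.foldl (bfsStep R C xy) (rest ++ nxt, dist)).2.get? c).isSome) ∧
    (∀ c w, dist.get? c = some w → (dirs.foldl (bfsStep R C xy) (rest ++ nxt, dist)).2.get? c = some w) ∧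
    (∀ c ∈ ((dirs.map (fun v => (xy.1 + v.1, xy.2 + v.2))).foldl (bfsAltStep R C (d + 1)) (items, seen, nxt)).2.2,
        (dirs.foldl (bfsStep R C xy) (rest ++ nxt, dist)).2.get? c = some (d + 1)) ∧
    ((dirs.map (fun v => (xy.1 + v.1, xy.2 + v.2))).foldl (bfsAltStep R C (d + 1)) (items, seen, nxt)).2.2.length
        + pvMissing R C (dirs.foldl (bfsStep R C xy) (rest ++ nxt, dist)).2
        = nxt.length + pvMissing R C dist := by
  intro dirs
  induction dirs with
  | nil =>
    intro nxt items seen dist h1 h2 hxy hnxt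
    exact ⟨rfl, h1, h2, fun c w h => h, hnxt, rfl⟩
  | cons v dirs ih =>
    intro nxt items seen dist h1 h2 hxy hnxt
    simp only [List.map_cons, List.foldl_cons]
    by_cases hcond : 0 ≤ xy.1 + v.1 ∧ xy.1 + v.1 < R ∧ 0 ≤ xy.2 + v.2 ∧ xy.2 + v.2 < C ∧
        dist.get? (xy.1 + v.1, xy.2 + v.2) = none
    · obtain ⟨hb1, hb2, hb3, hb4, hnone⟩ := hcond
      have hncont : PySem.Set.contains seen (xy.1 + v.1, xy.2 + v.2) = false := by
        rw [h2, hnone]; rfl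
      have hA : bfsStep R C xy (rest ++ nxt, dist) v
          = ((rest ++ nxt) ++ [(xy.1 + v.1, xy.2 + v.2)],
             dist.insert (xy.1 + v.1, xy.2 + v.2) (d + 1)) := by
        rw [bfsStep]
        rw [if_pos ⟨hb1, hb2, hb3, hb4, hnone⟩]
        dsimp only
        rw [PySem.Dict.getD_of_get?_eq_some dist 0 hxy]
      have hB : bfsAltStep R C (d + 1) (items, seen, nxt) (xy.1 + v.1, xy.2 + v.2)
          = (items ++ [((xy.1 + v.1, xy.2 + v.2), d + 1)],
             PySem.Set.add seen (xy.1 + v.1, xy.2 + v.2), nxt ++ [(xy.1 + v.1, xy.2 + v.2)]) := by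
        rw [bfsAltStep]
        rw [if_pos ⟨hb1, hb2, hb3, hb4, by rw [hncont]; simp⟩]
      rw [hA, hB]
      have hfresh : dist.contains (xy.1 + v.1, xy.2 + v.2) = false := by
        rw [PySem.Dict.contains_eq_isSome_get?, hnone]; rfl
      have hne_xy : xy ≠ (xy.1 + v.1, xy.2 + v.2) := by
        intro hh; rw [← hh, hxy] at hnone; cases hnone
      have h1' : (dist.insert (xy.1 + v.1, xy.2 + v.2) (d + 1)).items
          = items ++ [((xy.1 + v.1, xy.2 + v.2), d + 1)] := by
        rw [PySem.Dict.items_insert_of_not_contains _ _ hfresh, h1]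
      have h2' : ∀ c, PySem.Set.contains (PySem.Set.add seen (xy.1 + v.1, xy.2 + v.2)) c
          = ((dist.insert (xy.1 + v.1, xy.2 + v.2) (d + 1)).get? c).isSome := by
        intro c
        rw [pvSet_contains_add, PySem.Dict.get?_insert]
        by_cases hcn : c = (xy.1 + v.1, xy.2 + v.2)
        · simp [hcn]
        · rw [if_neg hcn, ← h2 c]
          have hb : (c == (xy.1 + v.1, xy.2 + v.2)) = false := by
            simp [hcn]
          rw [hb, Bool.false_or]
      have hxy' : (dist.insert (xy.1 + v.1, xy.2 + v.2) (d + 1)).get? xy = some d := by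
        rw [PySem.Dict.get?_insert, if_neg hne_xy, hxy]
      have hmono : ∀ c w, dist.get? c = some w →
          (dist.insert (xy.1 + v.1, xy.2 + v.2) (d + 1)).get? c = some w := by
        intro c w hw
        have : c ≠ (xy.1 + v.1, xy.2 + v.2) := by
          intro hh; rw [hh, hnone] at hw; cases hw
        rw [PySem.Dict.get?_insert, if_neg this, hw]
      have hnxt' : ∀ c ∈ nxt ++ [(xy.1 + v.1, xy.2 + v.2)],
          (dist.insert (xy.1 + v.1, xy.2 + v.2) (d + 1)).get? c = some (d + 1) := by
        intro c hcmem
        rcases List.mem_append.mp hcmem with hcm | hcm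
        · exact hmono c (d + 1) (hnxt c hcm)
        · rw [List.mem_singleton.mp hcm, PySem.Dict.get?_insert, if_pos rfl]
      have hq : (rest ++ nxt) ++ [(xy.1 + v.1, xy.2 + v.2)]
          = rest ++ (nxt ++ [(xy.1 + v.1, xy.2 + v.2)]) := List.append_assoc _ _ _
      rw [hq]
      obtain ⟨c1, c2, c3, c4, c5, c6⟩ := ih (nxt ++ [(xy.1 + v.1, xy.2 + v.2)]) _ _ _ h1' h2' hxy' hnxt'
      refine ⟨c1, c2, c3, fun c w hw => c4 c w (hmono c w hw), c5, ?_⟩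
      have hmiss := pvMissing_insert R C dist (xy.1 + v.1, xy.2 + v.2) (d + 1)
        ⟨hb1, hb2, hb3, hb4⟩ hnone
      rw [c6]
      simp only [List.length_append, List.length_cons, List.length_nil]
      omega
    · have hbneg : ¬ (0 ≤ (xy.1 + v.1 : Int) ∧ xy.1 + v.1 < R ∧ 0 ≤ xy.2 + v.2 ∧ xy.2 + v.2 < C ∧
          ¬ (PySem.Set.contains seen (xy.1 + v.1, xy.2 + v.2) = true)) := by
        intro ⟨hb1, hb2, hb3, hb4, hb5⟩
        apply hcond
        refine ⟨hb1, hb2, hb3, hb4, ?_⟩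
        rw [h2] at hb5
        cases hg : dist.get? (xy.1 + v.1, xy.2 + v.2) with
        | none => rfl
        | some w => rw [hg] at hb5; exact absurd rfl hb5
      have hA : bfsStep R C xy (rest ++ nxt, dist) v = (rest ++ nxt, dist) := by
        rw [bfsStep, if_neg hcond]
      have hB : bfsAltStep R C (d + 1) (items, seen, nxt) (xy.1 + v.1, xy.2 + v.2)
          = (items, seen, nxt) := by
        rw [bfsAltStep, if_neg hbneg]
      rw [hA, hB]
      exact ih nxt items seen dist h1 h2 hxy hnxt

-- A pops one whole level while B folds over its frontier once
theorem pvSimFrontier (R C : Int) (d : Int) :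
    ∀ (rem nxt : List (Int × Int)) (items : List ((Int × Int) × Int))
      (seen : PySem.Set (Int × Int)) (dist : PySem.Dict (Int × Int) Int),
    dist.items = items →
    (∀ c, PySem.Set.contains seen c = (dist.get? c).isSome) →
    (∀ c ∈ rem, dist.get? c = some d) →
    (∀ c ∈ nxt, dist.get? c = some (d + 1)) →
    ∃ dist' : PySem.Dict (Int × Int) Int,
      (∀ f, bfsLoop R C (rem.length + f) (rem ++ nxt) dist
          = bfsLoop R C f (rem.foldl (bfsAltCell R C (d + 1)) (items, seen, nxt)).2.2 dist') ∧
      dist'.items = (rem.foldl (bfsAltCell R C (d + 1)) (items, seen, nxt)).1 ∧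
      (∀ c, PySem.Set.contains (rem.foldl (bfsAltCell R C (d + 1)) (items, seen, nxt)).2.1 c
          = (dist'.get? c).isSome) ∧
      (∀ c ∈ (rem.foldl (bfsAltCell R C (d + 1)) (items, seen, nxt)).2.2, dist'.get? c = some (d + 1)) ∧
      (rem.foldl (bfsAltCell R C (d + 1)) (items, seen, nxt)).2.2.length + pvMissing R C dist'
          = nxt.length + pvMissing R C dist := by
  intro rem
  induction rem with
  | nil =>
    intro nxt items seen dist h1 h2 _ hnxt
    refine ⟨dist, ?_, h1, h2, hnxt, rfl⟩
    intro f
    simp only [List.foldl_nil, List.nil_append, List.length_nil, Nat.zero_add]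
  | cons c rest ih =>
    intro nxt items seen dist h1 h2 h3 hnxt
    have hcell : bfsAltCell R C (d + 1) (items, seen, nxt) c
        = ((bfsDirs.map (fun v => (c.1 + v.1, c.2 + v.2))).foldl (bfsAltStep R C (d + 1))
            (items, seen, nxt)) := by
      rw [bfsAltCell, pvNbrs_eq]
    obtain ⟨c1, c2, c3, c4, c5, c6⟩ :=
      pvSimDirs R C c d rest bfsDirs nxt items seen dist h1 h2 (h3 c List.mem_cons_self) hnxt
    have h3' : ∀ c' ∈ rest,
        (bfsDirs.foldl (bfsStep R C c) (rest ++ nxt, dist)).2.get? c' = some d :=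
      fun c' h => c4 c' d (h3 c' (List.mem_cons_of_mem c h))
    obtain ⟨dist', e1, e2, e3, e4, e5⟩ := ih
      ((bfsDirs.map (fun v => (c.1 + v.1, c.2 + v.2))).foldl (bfsAltStep R C (d + 1)) (items, seen, nxt)).2.2
      ((bfsDirs.map (fun v => (c.1 + v.1, c.2 + v.2))).foldl (bfsAltStep R C (d + 1)) (items, seen, nxt)).1
      ((bfsDirs.map (fun v => (c.1 + v.1, c.2 + v.2))).foldl (bfsAltStep R C (d + 1)) (items, seen, nxt)).2.1
      (bfsDirs.foldl (bfsStep R C c) (rest ++ nxt, dist)).2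
      c2 c3 h3' c5
    have hBfold : (c :: rest).foldl (bfsAltCell R C (d + 1)) (items, seen, nxt)
        = rest.foldl (bfsAltCell R C (d + 1))
          (((bfsDirs.map (fun v => (c.1 + v.1, c.2 + v.2))).foldl (bfsAltStep R C (d + 1)) (items, seen, nxt)).1,
           ((bfsDirs.map (fun v => (c.1 + v.1, c.2 + v.2))).foldl (bfsAltStep R C (d + 1)) (items, seen, nxt)).2.1,
           ((bfsDirs.map (fun v => (c.1 + v.1, c.2 + v.2))).foldl (bfsAltStep R C (d + 1)) (items, seen, nxt)).2.2) := by
      rw [List.foldl_cons, hcell]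
    refine ⟨dist', ?_, by rw [hBfold]; exact e2, by rw [hBfold]; exact e3,
      by rw [hBfold]; exact e4, ?_⟩
    · intro f
      have hlen : (c :: rest).length + f = (rest.length + f) + 1 := by
        simp only [List.length_cons]; omega
      rw [hlen]
      have hq : (c :: rest) ++ nxt = c :: (rest ++ nxt) := rfl
      rw [hq]
      show bfsLoop R C (rest.length + f)
          (bfsDirs.foldl (bfsStep R C c) (rest ++ nxt, dist)).1
          (bfsDirs.foldl (bfsStep R C c) (rest ++ nxt, dist)).2
        = bfsLoop R C f ((c :: rest).foldl (bfsAltCell R C (d + 1)) (items, seen, nxt)).2.2 dist'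
      rw [c1, hBfold]
      exact e1 f
    · rw [hBfold]
      omega
-- the two whole loops agree, given enough fuel on each side
theorem pvSimLoop (R C : Int) :
    ∀ (fB : Nat) (frontier : List (Int × Int)) (items : List ((Int × Int) × Int))
      (seen : PySem.Set (Int × Int)) (dist : PySem.Dict (Int × Int) Int) (d : Int) (fA : Nat),
    dist.items = items →
    (∀ c, PySem.Set.contains seen c = (dist.get? c).isSome) →
    (∀ c ∈ frontier, dist.get? c = some d) →
    frontier.length + pvMissing R C dist ≤ fA →
    pvMissing R C dist < fB →
    (bfsLoop R C fA frontier dist).items = bfsAltLoop R C fB items seen frontier d := by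
  intro fB
  induction fB with
  | zero => intro _ _ _ _ _ _ _ _ _ _ hB; omega
  | succ g ih =>
    intro frontier items seen dist d fA h1 h2 h3 hA hB
    cases frontier with
    | nil =>
      cases fA <;> simp only [bfsLoop, bfsAltLoop] <;> exact h1
    | cons c rest =>
      obtain ⟨dist', e1, e2, e3, e4, e5⟩ :=
        pvSimFrontier R C d (c :: rest) [] items seen dist h1 h2 h3 (by intro x hx; cases hx)
      have hflen : (c :: rest).length ≤ fA := by
        have := hA; simp only [List.length_cons] at this ⊢; omega
      have hfa : fA = (c :: rest).length + (fA - (c :: rest).length) := by omega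
      have hAeq : bfsLoop R C fA (c :: rest) dist
          = bfsLoop R C (fA - (c :: rest).length)
              ((c :: rest).foldl (bfsAltCell R C (d + 1)) (items, seen, [])).2.2 dist' := by
        conv_lhs => rw [hfa]
        have := e1 (fA - (c :: rest).length)
        rw [List.append_nil] at this
        exact this
      have hBeq : bfsAltLoop R C (g + 1) items seen (c :: rest) d
          = bfsAltLoop R C g
              ((c :: rest).foldl (bfsAltCell R C (d + 1)) (items, seen, [])).1
              ((c :: rest).foldl (bfsAltCell R C (d + 1)) (items, seen, [])).2.1
              ((c :: rest).foldl (bfsAltCell R C (d + 1)) (items, seen, [])).2.2 (d + 1) := by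
        simp only [bfsAltLoop]
      rw [hAeq, hBeq]
      cases hn : ((c :: rest).foldl (bfsAltCell R C (d + 1)) (items, seen, [])).2.2 with
      | nil =>
        cases g <;> cases (fA - (c :: rest).length) <;>
          simp only [bfsAltLoop, bfsLoop] <;> exact e2
      | cons c' r' =>
        rw [← hn]
        apply ih _ _ _ _ (d + 1) _ e2 e3 e4
        · rw [hn] at e5 ⊢
          simp only [List.length_nil, Nat.zero_add] at e5
          simp only [List.length_cons] at e5 ⊢
          simp only [List.length_cons] at hA
          omega
        · rw [hn] at e5
          simp only [List.length_nil, Nat.zero_add, List.length_cons] at e5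
          omega
-- ===== VERDICT (by name: the statement is the Claim_ definition above) =====
theorem pvInitItems (start : Int × Int) :
    (PySem.Dict.ofList [(start, (0 : Int))]).items = [(start, 0)] := by
  simp [PySem.Dict.ofList, PySem.Dict.update, PySem.Dict.insert, PySem.Dict.contains,
    PySem.Dict.empty]

theorem pvInitContains (start c : Int × Int) :
    PySem.Set.contains (PySem.Set.ofList [start]) c
      = ((PySem.Dict.ofList [(start, (0 : Int))]).get? c).isSome := by
  simp [PySem.Set.ofList, PySem.Set.add, PySem.Set.contains, PySem.Dict.ofList, PySem.Dict.update,
    PySem.Dict.insert, PySem.Dict.contains, PySem.Dict.empty, PySem.Dict.get?]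
  by_cases h : c = start
  · simp [h]
  · simp [h]
    exact fun hh => h hh.symm

theorem pvInitGet (start : Int × Int) :
    (PySem.Dict.ofList [(start, (0 : Int))]).get? start = some 0 := by
  simp [PySem.Dict.ofList, PySem.Dict.update, PySem.Dict.insert, PySem.Dict.contains,
    PySem.Dict.empty, PySem.Dict.get?]

theorem pvMissing_le' (universe_ : List (List String)) (dist : PySem.Dict (Int × Int) Int) :
    pvMissing (universe_.length : Int) ((universe_.headD []).length : Int) dist
      ≤ universe_.length * (universe_.headD []).length := by
  have := pvMissing_le (universe_.length : Int) ((universe_.headD []).length : Int) dist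
  simpa using this

theorem bfs_spec : Claim_equal_bfs := by
  unfold Claim_equal_bfs Spec_bfs
  intro u start _
  unfold bfs bfs_alt
  dsimp only
  have hm := pvMissing_le' u (PySem.Dict.ofList [(start, (0 : Int))])
  have hmain := pvSimLoop (u.length : Int) ((u.headD []).length : Int)
      (u.length * (u.headD []).length + 1) [start] [(start, 0)] (PySem.Set.ofList [start])
      (PySem.Dict.ofList [(start, 0)]) 0 (u.length * (u.headD []).length + 1)
      (pvInitItems start) (pvInitContains start)
      (by intro c hc; rw [List.mem_singleton.mp hc]; exact pvInitGet start)
      (by simp only [List.length_singleton]; omega)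
      (by omega)
  rw [hmain]
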